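-- pv_equiv track=rewrite | github.com/andrewkwatts-maker/Periodics | core/unified_table.py | get_available_orbitals
-- ===== SOURCE A (Python) =====
-- def get_available_orbitals(z):
--     """
--     Calculate available orbitals based on electron configuration.
--     Returns list of (n, l, m, label) tuples for orbitals that contain electrons.
--
--     Orbital filling order: 1s, 2s, 2p, 3s, 3p, 4s, 3d, 4p, 5s, 4d, 5p, 6s, 4f, 5d, 6p, 7s, 5f, 6d, 7p
--     """
--     orbitals = []
--
--     # Filling order with (n, l, label, max_electrons)
--     filling_order = [
--         (1, 0, '1s', 2),
--         (2, 0, '2s', 2),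
--         (2, 1, '2p', 6),
--         (3, 0, '3s', 2),
--         (3, 1, '3p', 6),
--         (4, 0, '4s', 2),
--         (3, 2, '3d', 10),
--         (4, 1, '4p', 6),
--         (5, 0, '5s', 2),
--         (4, 2, '4d', 10),
--         (5, 1, '5p', 6),
--         (6, 0, '6s', 2),
--         (4, 3, '4f', 14),
--         (5, 2, '5d', 10),
--         (6, 1, '6p', 6),
--         (7, 0, '7s', 2),
--         (5, 3, '5f', 14),
--         (6, 2, '6d', 10),
--         (7, 1, '7p', 6),
--     ]
--
--     electrons_remaining = z
--
--     for n, l, label, max_electrons in filling_order: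
--         if electrons_remaining <= 0:
--             break
--
--         # Number of electrons in this orbital
--         electrons_in_orbital = min(electrons_remaining, max_electrons)
--         electrons_remaining -= electrons_in_orbital
--
--         # Add all m values for this orbital (m ranges from -l to +l)
--         for m in range(-l, l + 1):
--             if l == 0:  # s orbital
--                 m_label = ''
--             elif l == 1:  # p orbital
--                 m_names = ['px', 'py', 'pz']
--                 m_label = f" ({m_names[m + 1]})"
--             elif l == 2:  # d orbital
--                 m_names = ['dxy', 'dyz', 'dz²', 'dxz', 'dx²-y²']
--                 if -2 <= m <= 2:
--                     m_label = f" ({m_names[m + 2]})"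
--                 else:
--                     m_label = f" (m={m})"
--             elif l == 3:  # f orbital
--                 m_label = f" (m={m})"
--             else:
--                 m_label = f" (m={m})"
--
--             full_label = f"{label}{m_label}"
--             orbitals.append((n, l, m, full_label))
--
--     return orbitals
-- ===== SOURCE B (Python) =====
-- """Fully materialized orbital table: each row is (cum_before, n, l, m, label), where
-- cum_before is the total electron capacity of all earlier orbitals.  An orbital row
-- is occupied exactly when cum_before < z, so the whole function is a single filter
-- over the precomputed table -- no running counter, no label formatting at runtime."""
--
-- _ORBITALS = [
--     (0, 1, 0, 0, '1s'),
--     (2, 2, 0, 0, '2s'),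
--     (4, 2, 1, -1, '2p (px)'),
--     (4, 2, 1, 0, '2p (py)'),
--     (4, 2, 1, 1, '2p (pz)'),
--     (10, 3, 0, 0, '3s'),
--     (12, 3, 1, -1, '3p (px)'),
--     (12, 3, 1, 0, '3p (py)'),
--     (12, 3, 1, 1, '3p (pz)'),
--     (18, 4, 0, 0, '4s'),
--     (20, 3, 2, -2, '3d (dxy)'),
--     (20, 3, 2, -1, '3d (dyz)'),
--     (20, 3, 2, 0, '3d (dz²)'),
--     (20, 3, 2, 1, '3d (dxz)'),
--     (20, 3, 2, 2, '3d (dx²-y²)'),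
--     (30, 4, 1, -1, '4p (px)'),
--     (30, 4, 1, 0, '4p (py)'),
--     (30, 4, 1, 1, '4p (pz)'),
--     (36, 5, 0, 0, '5s'),
--     (38, 4, 2, -2, '4d (dxy)'),
--     (38, 4, 2, -1, '4d (dyz)'),
--     (38, 4, 2, 0, '4d (dz²)'),
--     (38, 4, 2, 1, '4d (dxz)'),
--     (38, 4, 2, 2, '4d (dx²-y²)'),
--     (48, 5, 1, -1, '5p (px)'),
--     (48, 5, 1, 0, '5p (py)'),
--     (48, 5, 1, 1, '5p (pz)'),
--     (54, 6, 0, 0, '6s'),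
--     (56, 4, 3, -3, '4f (m=-3)'),
--     (56, 4, 3, -2, '4f (m=-2)'),
--     (56, 4, 3, -1, '4f (m=-1)'),
--     (56, 4, 3, 0, '4f (m=0)'),
--     (56, 4, 3, 1, '4f (m=1)'),
--     (56, 4, 3, 2, '4f (m=2)'),
--     (56, 4, 3, 3, '4f (m=3)'),
--     (70, 5, 2, -2, '5d (dxy)'),
--     (70, 5, 2, -1, '5d (dyz)'),
--     (70, 5, 2, 0, '5d (dz²)'),
--     (70, 5, 2, 1, '5d (dxz)'),
--     (70, 5, 2, 2, '5d (dx²-y²)'),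
--     (80, 6, 1, -1, '6p (px)'),
--     (80, 6, 1, 0, '6p (py)'),
--     (80, 6, 1, 1, '6p (pz)'),
--     (86, 7, 0, 0, '7s'),
--     (88, 5, 3, -3, '5f (m=-3)'),
--     (88, 5, 3, -2, '5f (m=-2)'),
--     (88, 5, 3, -1, '5f (m=-1)'),
--     (88, 5, 3, 0, '5f (m=0)'),
--     (88, 5, 3, 1, '5f (m=1)'),
--     (88, 5, 3, 2, '5f (m=2)'),
--     (88, 5, 3, 3, '5f (m=3)'),
--     (102, 6, 2, -2, '6d (dxy)'),
--     (102, 6, 2, -1, '6d (dyz)'),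
--     (102, 6, 2, 0, '6d (dz²)'),
--     (102, 6, 2, 1, '6d (dxz)'),
--     (102, 6, 2, 2, '6d (dx²-y²)'),
--     (112, 7, 1, -1, '7p (px)'),
--     (112, 7, 1, 0, '7p (py)'),
--     (112, 7, 1, 1, '7p (pz)'),
-- ]
--
-- def get_available_orbitals(z):
--     return [(n, l, m, lab) for c, n, l, m, lab in _ORBITALS if c < z]
-- ===== Notes on version B (the rewrite author's own statement) =====
-- stated objective: alternative
-- what changed: Replaces A's stateful scan (running electrons_remaining, break, per-orbital m-loop and f-string label construction) with a fully materialized flat table of all (cum_before, n, l, m, label) rows built once at module load; the function is a single filter keeping rows whose cumulative-before capacity is < z, with no counter, no inner loop and no runtime label formatting.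
import Mathlib
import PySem

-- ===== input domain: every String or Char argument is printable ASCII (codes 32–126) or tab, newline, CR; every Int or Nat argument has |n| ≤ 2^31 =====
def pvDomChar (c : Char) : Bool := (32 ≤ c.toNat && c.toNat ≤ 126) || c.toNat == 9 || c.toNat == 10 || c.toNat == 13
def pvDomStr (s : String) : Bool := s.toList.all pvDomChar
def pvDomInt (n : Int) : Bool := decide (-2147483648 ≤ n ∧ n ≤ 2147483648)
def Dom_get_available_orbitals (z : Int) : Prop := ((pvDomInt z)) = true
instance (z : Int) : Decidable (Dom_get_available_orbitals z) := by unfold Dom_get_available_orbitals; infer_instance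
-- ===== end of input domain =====

-- B replaces A's stateful scan (running counter, break, per-orbital m-loop with f-string labels)
-- by one filter over a fully materialized flat (cum_before, n, l, m, label) table; objective: alternative.

-- ===== PORT A =====
def pvTableA : List (Int × Int × String × Int) :=
  [(1, 0, "1s", 2), (2, 0, "2s", 2), (2, 1, "2p", 6), (3, 0, "3s", 2),
   (3, 1, "3p", 6), (4, 0, "4s", 2), (3, 2, "3d", 10), (4, 1, "4p", 6),
   (5, 0, "5s", 2), (4, 2, "4d", 10), (5, 1, "5p", 6), (6, 0, "6s", 2),
   (4, 3, "4f", 14), (5, 2, "5d", 10), (6, 1, "6p", 6), (7, 0, "7s", 2),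
   (5, 3, "5f", 14), (6, 2, "6d", 10), (7, 1, "7p", 6)]

-- A's if/elif chain for m_label; the list indexings m_names[m+1] / m_names[m+2] are always
-- in range inside the loop (m ∈ range(-l, l+1)), so .getD "" is never taken.
def pvMLabelA (l m : Int) : String :=
  if l = 0 then ""
  else if l = 1 then " (" ++ ((PySem.List.pyGet? ["px", "py", "pz"] (m + 1)).getD "") ++ ")"
  else if l = 2 then
    if -2 ≤ m ∧ m ≤ 2 then
      " (" ++ ((PySem.List.pyGet? ["dxy", "dyz", "dz²", "dxz", "dx²-y²"] (m + 2)).getD "") ++ ")"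
    else " (m=" ++ PySem.Int.toStr m ++ ")"
  else if l = 3 then " (m=" ++ PySem.Int.toStr m ++ ")"
  else " (m=" ++ PySem.Int.toStr m ++ ")"

-- A's inner 'for m in range(-l, l+1)' loop appending (n, l, m, full_label)
def pvExpandA (e : Int × Int × String × Int) : List (Int × Int × Int × String) :=
  (PySem.List.pyRange (-e.2.1) (e.2.1 + 1) 1).map
    (fun m => (e.1, e.2.1, m, e.2.2.1 ++ pvMLabelA e.2.1 m))

-- A's outer loop with the running electrons_remaining counter and the break
def pvGoA : Int → List (Int × Int × String × Int) → List (Int × Int × Int × String)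
  | _, [] => []
  | rem, e :: rest =>
    if rem ≤ 0 then []
    else pvExpandA e ++ pvGoA (rem - min rem e.2.2.2) rest

def get_available_orbitals (z : Int) : List (Int × Int × Int × String) := pvGoA z pvTableA

-- ===== PORT B =====
-- Source B's module-level _ORBITALS: (cum_before, n, l, m, label), one row per (orbital, m)
def pvFlatB : List (Int × Int × Int × Int × String) :=
  [(0, 1, 0, 0, "1s"),
   (2, 2, 0, 0, "2s"),
   (4, 2, 1, -1, "2p (px)"),
   (4, 2, 1, 0, "2p (py)"),
   (4, 2, 1, 1, "2p (pz)"),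
   (10, 3, 0, 0, "3s"),
   (12, 3, 1, -1, "3p (px)"),
   (12, 3, 1, 0, "3p (py)"),
   (12, 3, 1, 1, "3p (pz)"),
   (18, 4, 0, 0, "4s"),
   (20, 3, 2, -2, "3d (dxy)"),
   (20, 3, 2, -1, "3d (dyz)"),
   (20, 3, 2, 0, "3d (dz²)"),
   (20, 3, 2, 1, "3d (dxz)"),
   (20, 3, 2, 2, "3d (dx²-y²)"),
   (30, 4, 1, -1, "4p (px)"),
   (30, 4, 1, 0, "4p (py)"),
   (30, 4, 1, 1, "4p (pz)"),
   (36, 5, 0, 0, "5s"),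
   (38, 4, 2, -2, "4d (dxy)"),
   (38, 4, 2, -1, "4d (dyz)"),
   (38, 4, 2, 0, "4d (dz²)"),
   (38, 4, 2, 1, "4d (dxz)"),
   (38, 4, 2, 2, "4d (dx²-y²)"),
   (48, 5, 1, -1, "5p (px)"),
   (48, 5, 1, 0, "5p (py)"),
   (48, 5, 1, 1, "5p (pz)"),
   (54, 6, 0, 0, "6s"),
   (56, 4, 3, -3, "4f (m=-3)"),
   (56, 4, 3, -2, "4f (m=-2)"),
   (56, 4, 3, -1, "4f (m=-1)"),
   (56, 4, 3, 0, "4f (m=0)"),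
   (56, 4, 3, 1, "4f (m=1)"),
   (56, 4, 3, 2, "4f (m=2)"),
   (56, 4, 3, 3, "4f (m=3)"),
   (70, 5, 2, -2, "5d (dxy)"),
   (70, 5, 2, -1, "5d (dyz)"),
   (70, 5, 2, 0, "5d (dz²)"),
   (70, 5, 2, 1, "5d (dxz)"),
   (70, 5, 2, 2, "5d (dx²-y²)"),
   (80, 6, 1, -1, "6p (px)"),
   (80, 6, 1, 0, "6p (py)"),
   (80, 6, 1, 1, "6p (pz)"),
   (86, 7, 0, 0, "7s"),
   (88, 5, 3, -3, "5f (m=-3)"),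
   (88, 5, 3, -2, "5f (m=-2)"),
   (88, 5, 3, -1, "5f (m=-1)"),
   (88, 5, 3, 0, "5f (m=0)"),
   (88, 5, 3, 1, "5f (m=1)"),
   (88, 5, 3, 2, "5f (m=2)"),
   (88, 5, 3, 3, "5f (m=3)"),
   (102, 6, 2, -2, "6d (dxy)"),
   (102, 6, 2, -1, "6d (dyz)"),
   (102, 6, 2, 0, "6d (dz²)"),
   (102, 6, 2, 1, "6d (dxz)"),
   (102, 6, 2, 2, "6d (dx²-y²)"),
   (112, 7, 1, -1, "7p (px)"),
   (112, 7, 1, 0, "7p (py)"),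
   (112, 7, 1, 1, "7p (pz)")]

-- Source B's single list comprehension: keep rows with cum_before < z, drop the cum column
def get_available_orbitals_alt (z : Int) : List (Int × Int × Int × String) :=
  (pvFlatB.filter (fun p => decide (p.1 < z))).map (fun p => p.2)

-- ===== PRECONDITION & SPEC =====
def Spec_get_available_orbitals (z : Int) (out : List (Int × Int × Int × String)) : Prop := out = get_available_orbitals_alt z
instance (z : Int) (out : List (Int × Int × Int × String)) : Decidable (Spec_get_available_orbitals z out) := by unfold Spec_get_available_orbitals; infer_instance

-- ===== CLAIM (what is proved, stated in full; the proofs are below) =====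
def Claim_equal_get_available_orbitals : Prop := ∀ (z : Int), Dom_get_available_orbitals z → Spec_get_available_orbitals z (get_available_orbitals z)

-- ===== LEMMAS AND PROOFS =====

theorem pvGoA_nonpos (rem : Int) (t : List (Int × Int × String × Int)) (h : rem ≤ 0) :
    pvGoA rem t = [] := by
  cases t with
  | nil => rfl
  | cons e rest => simp [pvGoA, h]

-- b-side cumulative-before list of A's table (proof-only helper)
def pvCB : Int → List (Int × Int × String × Int) → List Int
  | _, [] => []
  | total, e :: rest => total :: pvCB (total + e.2.2.2) rest

theorem pvCB_shift (t : List (Int × Int × String × Int)) :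
    ∀ a b : Int, pvCB (a + b) t = (pvCB b t).map (a + ·) := by
  induction t with
  | nil => intro a b; rfl
  | cons e rest ih =>
    intro a b
    simp only [pvCB, List.map_cons, List.cons.injEq, true_and]
    rw [add_assoc, ih]

theorem pvCB_le (t : List (Int × Int × String × Int)) (hpos : ∀ e ∈ t, 0 < e.2.2.2) :
    ∀ a : Int, ∀ c ∈ pvCB a t, a ≤ c := by
  induction t with
  | nil => intro a c hc; simp [pvCB] at hc
  | cons e rest ih =>
    intro a c hc
    simp only [pvCB, List.mem_cons] at hc
    rcases hc with h | h
    · omega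
    · have he : 0 < e.2.2.2 := hpos e (by simp)
      have := ih (fun x hx => hpos x (by simp [hx])) (a + e.2.2.2) c h
      omega

-- A's scan equals the prefix of the table cut at the count of cumulative thresholds below z
theorem pvGoA_eq_prefix (t : List (Int × Int × String × Int)) (hpos : ∀ e ∈ t, 0 < e.2.2.2) :
    ∀ z : Int, pvGoA z t =
      (t.take ((pvCB 0 t).countP (fun c => decide (c < z)))).flatMap pvExpandA := by
  induction t with
  | nil => intro z; rfl
  | cons e rest ih =>
    intro z
    have hposr : ∀ x ∈ rest, 0 < x.2.2.2 := fun x hx => hpos x (by simp [hx])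
    have he : 0 < e.2.2.2 := hpos e (by simp)
    have hcount : (pvCB 0 (e :: rest)).countP (fun c => decide (c < z)) =
        (if 0 < z then 1 else 0) + (pvCB 0 rest).countP (fun c => decide (c < z - e.2.2.2)) := by
      have hcb : pvCB (0 + e.2.2.2) rest = (pvCB 0 rest).map (fun x => e.2.2.2 + x) := by
        have h := pvCB_shift rest e.2.2.2 0
        simpa [add_comm] using h
      rw [show pvCB 0 (e :: rest) = 0 :: pvCB (0 + e.2.2.2) rest from rfl,
        List.countP_cons, hcb, List.countP_map]
      have hfun : ((fun c => decide (c < z)) ∘ fun x => e.2.2.2 + x) =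
          (fun c => decide (c < z - e.2.2.2)) := by
        funext c; simp only [Function.comp_apply, decide_eq_decide]; omega
      rw [hfun]
      by_cases hz : 0 < z <;> simp [hz] <;> omega
    by_cases hz : z ≤ 0
    · have h0 : (pvCB 0 rest).countP (fun c => decide (c < z - e.2.2.2)) = 0 := by
        apply List.countP_eq_zero.mpr
        intro c hc
        have := pvCB_le rest hposr 0 c hc
        simp only [decide_eq_true_eq]; omega
      rw [pvGoA_nonpos z _ hz, hcount, h0]
      simp [show ¬ (0:Int) < z from by omega]
    · rw [hcount]
      simp only [if_pos (show (0:Int) < z from by omega)]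
      have htake : (e :: rest).take (1 + (pvCB 0 rest).countP (fun c => decide (c < z - e.2.2.2)))
          = e :: rest.take ((pvCB 0 rest).countP (fun c => decide (c < z - e.2.2.2))) := by
        rw [Nat.add_comm]; rfl
      rw [htake]
      simp only [pvGoA, List.flatMap_cons]
      rw [if_neg (by omega)]
      congr 1
      by_cases hle : z ≤ e.2.2.2
      · have hmin : min z e.2.2.2 = z := by omega
        rw [hmin, sub_self, pvGoA_nonpos 0 rest le_rfl]
        have h0 : (pvCB 0 rest).countP (fun c => decide (c < z - e.2.2.2)) = 0 := by
          apply List.countP_eq_zero.mpr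
          intro c hc
          have := pvCB_le rest hposr 0 c hc
          simp only [decide_eq_true_eq]; omega
        rw [h0]; rfl
      · have hmin : min z e.2.2.2 = e.2.2.2 := by omega
        rw [hmin, ih hposr (z - e.2.2.2)]

-- the orbital blocks of A's table, tagged with their cumulative-before thresholds
def pvBlocks : List (Int × List (Int × Int × Int × String)) :=
  (pvCB 0 pvTableA).zip (pvTableA.map pvExpandA)

-- on a fst-nondecreasing list, filtering fst < z keeps exactly a prefix of length countP
theorem filter_eq_take_countP {α : Type} (z : Int) :
    ∀ l : List (Int × α), l.Pairwise (fun a b => a.1 ≤ b.1) →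
      l.filter (fun p => decide (p.1 < z)) = l.take (l.countP (fun p => decide (p.1 < z))) := by
  intro l hl
  induction l with
  | nil => rfl
  | cons x xs ih =>
    rcases List.pairwise_cons.mp hl with ⟨hx, hxs⟩
    by_cases h : x.1 < z
    · simp only [List.filter_cons, List.countP_cons, h, decide_true, if_pos]
      rw [ih hxs]
      rfl
    · have h0 : xs.countP (fun p => decide (p.1 < z)) = 0 := by
        apply List.countP_eq_zero.mpr
        intro c hc
        have := hx c hc
        simp only [decide_eq_true_eq]; omega
      have hf : xs.filter (fun p => decide (p.1 < z)) = [] := by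
        apply List.filter_eq_nil_iff.mpr
        intro c hc
        have := hx c hc
        simp only [decide_eq_true_eq]; omega
      simp [h, hf, h0]

-- filtering the flattened tagged rows = flattening the filtered blocks
theorem filter_flatMap_const {β : Type} (z : Int) :
    ∀ l : List (Int × List β),
      ((l.flatMap (fun b => b.2.map (fun t => (b.1, t)))).filter
          (fun p => decide (p.1 < z))).map (fun p => p.2) =
        (l.filter (fun b => decide (b.1 < z))).flatMap (fun b => b.2) := by
  intro l
  induction l with
  | nil => rfl
  | cons b rest ih =>
    simp only [List.flatMap_cons, List.filter_append, List.map_append, ih, List.filter_cons]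
    by_cases h : b.1 < z
    · simp [h, List.filter_map, Function.comp_def, List.map_map]
    · simp [h, List.filter_map, Function.comp_def]

theorem zip_take_flatMap_snd {α β : Type} :
    ∀ (k : Nat) (a : List α) (b : List (List β)), a.length = b.length →
      (((a.zip b).take k).flatMap (fun p => p.2)) = ((b.take k).map id).flatten := by
  intro k
  induction k with
  | zero => intro a b _; rfl
  | succ k ih =>
    intro a b hlen
    cases a with
    | nil => cases b with
      | nil => rfl
      | cons y ys => simp at hlen
    | cons x xs =>
      cases b with
      | nil => simp at hlen
      | cons y ys =>
        simp only [List.zip_cons_cons, List.take_succ_cons, List.flatMap_cons,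
          List.map_cons, List.flatten_cons]
        rw [ih xs ys (by simpa using hlen)]
        rfl

-- the literal flat table equals the flattening of the tagged blocks (closed computation)
theorem pvFlatB_eq :
    pvFlatB = pvBlocks.flatMap (fun b => b.2.map (fun t => (b.1, t))) := by decide

theorem pvBlocks_pairwise : pvBlocks.Pairwise (fun a b => a.1 ≤ b.1) := by decide

-- ===== VERDICT (by name: the statement is the Claim_ definition above) =====
theorem get_available_orbitals_spec : Claim_equal_get_available_orbitals := by
  intro z _
  show get_available_orbitals z = get_available_orbitals_alt z
  unfold get_available_orbitals get_available_orbitals_alt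
  rw [pvFlatB_eq, filter_flatMap_const, filter_eq_take_countP z pvBlocks pvBlocks_pairwise,
    pvGoA_eq_prefix pvTableA (by decide) z]
  have hcnt : pvBlocks.countP (fun p => decide (p.1 < z)) =
      (pvCB 0 pvTableA).countP (fun c => decide (c < z)) := by
    have h1 : pvBlocks.map (fun p => p.1) = pvCB 0 pvTableA := by decide
    rw [← h1, List.countP_map]
    rfl
  rw [hcnt]
  have := zip_take_flatMap_snd ((pvCB 0 pvTableA).countP (fun c => decide (c < z)))
    (pvCB 0 pvTableA) (pvTableA.map pvExpandA) (by decide)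
  rw [show pvBlocks = (pvCB 0 pvTableA).zip (pvTableA.map pvExpandA) from rfl, this,
    List.map_id, ← List.map_take, ← List.flatMap_def]
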